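-- pv_equiv track=rewrite | github.com/storm-credit/askanything_video_generator | modules/transcription/whisper.py | _lcs_anchors_windowed
-- ===== SOURCE A (Python) =====
-- def _lcs_anchors_windowed(src: list[str], tgt: list[str], window: int = 30) -> list[tuple[int, int]]:
--     """긴 시퀀스용 — 슬라이딩 윈도우 내에서만 LCS 탐색."""
--     anchors: list[tuple[int, int]] = []
--     j_start = 0
--     for i, sw in enumerate(src):
--         j_end = min(j_start + window, len(tgt))
--         for j in range(j_start, j_end):
--             if tgt[j] == sw:
--                 anchors.append((i, j))
--                 j_start = j + 1
--                 break
--     return anchors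
-- ===== SOURCE B (Python) =====
-- def _lcs_anchors_windowed(src: list[str], tgt: list[str], window: int = 30) -> list[tuple[int, int]]:
--     """Occurrence-index variant: build, once, a dict mapping each word of tgt to its
--     (ascending) occurrence positions; for each source word, binary-search that list
--     for the first position >= j_start and accept it iff it falls inside the window."""
--     occ: dict[str, list[int]] = {}
--     for j, w in enumerate(tgt):
--         occ.setdefault(w, []).append(j)
--     anchors: list[tuple[int, int]] = []
--     j_start = 0
--     for i in range(len(src)):
--         ps = occ.get(src[i], [])
--         lo, hi = 0, len(ps)
--         while lo < hi:
--             mid = (lo + hi) // 2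
--             if ps[mid] < j_start:
--                 lo = mid + 1
--             else:
--                 hi = mid
--         if lo < len(ps) and ps[lo] < j_start + window:
--             anchors.append((i, ps[lo]))
--             j_start = ps[lo] + 1
--     return anchors
-- ===== Notes on version B (the rewrite author's own statement) =====
-- stated objective: faster
-- what changed: Replaces A's per-source-word linear scan over the window positions of tgt with an occurrence index built once (word -> ascending positions in tgt) plus a hand-written binary search that jumps to the word's first occurrence >= j_start, accepted iff it lies inside the window.
import Mathlib
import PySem

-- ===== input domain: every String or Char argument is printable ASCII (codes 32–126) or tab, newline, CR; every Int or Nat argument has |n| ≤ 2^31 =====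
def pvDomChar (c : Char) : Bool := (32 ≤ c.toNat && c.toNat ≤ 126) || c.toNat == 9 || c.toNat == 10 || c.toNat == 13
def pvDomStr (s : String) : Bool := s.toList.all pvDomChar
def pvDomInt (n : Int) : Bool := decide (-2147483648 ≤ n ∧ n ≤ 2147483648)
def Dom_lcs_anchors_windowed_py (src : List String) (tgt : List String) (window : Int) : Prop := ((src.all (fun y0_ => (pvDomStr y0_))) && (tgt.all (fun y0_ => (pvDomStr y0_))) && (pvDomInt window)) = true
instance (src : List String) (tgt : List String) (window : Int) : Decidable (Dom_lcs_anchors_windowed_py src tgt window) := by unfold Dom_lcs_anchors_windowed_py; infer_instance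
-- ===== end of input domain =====

-- B replaces A's per-word scan over window positions of tgt with an occurrence index
-- (word -> ascending positions) queried by a hand-written binary search (objective: faster).

-- ===== PORT A =====
-- one iteration of A's outer loop; the inner 'for j in range(j_start, j_end): if tgt[j] == sw: append; j_start = j+1; break'
-- is the first match of the range, i.e. find? (tgt[j] via pyGetD: every scanned j satisfies 0 ≤ j < len(tgt), so it is exact)
def pvStepA (tgt : List String) (window : Int) (st : List (Int × Int) × Int) (p : Int × String) : List (Int × Int) × Int :=
  let jend := min (st.2 + window) ((tgt.length : Int))
  match (PySem.List.pyRange st.2 jend 1).find? (fun j => PySem.List.pyGetD tgt j "" == p.2) with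
  | some j => (st.1 ++ [(p.1, j)], j + 1)
  | none => st

def lcs_anchors_windowed_py (src : List String) (tgt : List String) (window : Int) : List (Int × Int) :=
  ((PySem.List.enumerate src).foldl (pvStepA tgt window) (([] : List (Int × Int)), (0 : Int))).1

-- ===== PORT B =====
-- occ: for j, w in enumerate(tgt): occ.setdefault(w, []).append(j)
def pvOccDict (tgt : List String) : PySem.Dict String (List Int) :=
  (PySem.List.enumerate tgt).foldl (fun d p => d.modify p.2 [] (· ++ [p.1])) PySem.Dict.empty

-- Source B's hand-written 'while lo < hi' binary search, step for step (exact: every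
-- probed index satisfies 0 ≤ mid < len(ps), so ps[mid] is pyGetD)
def pvBisect (ps : List Int) (x : Int) (lo hi : Int) : Int :=
  if h : lo < hi then
    let mid := PySem.Int.floordiv (lo + hi) 2
    if PySem.List.pyGetD ps mid 0 < x then pvBisect ps x (mid + 1) hi
    else pvBisect ps x lo mid
  else lo
termination_by (hi - lo).toNat
decreasing_by
  · have h1 := (PySem.Int.floordiv_two_mid_bounds (le_of_lt h)).1
    omega
  · have h1 := (PySem.Int.floordiv_two_mid_bounds (le_of_lt h)).1
    have h2 : PySem.Int.floordiv (lo + hi) 2 < hi :=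
      (PySem.Int.floordiv_lt_iff_lt_mul (by omega)).mpr (by omega)
    omega

-- one iteration of Source B's main loop over i in range(len(src))
def pvStepB (src : List String) (occ : PySem.Dict String (List Int)) (window : Int)
    (st : List (Int × Int) × Int) (i : Int) : List (Int × Int) × Int :=
  let ps := occ.getD (PySem.List.pyGetD src i "") []
  let lo := pvBisect ps st.2 0 ((ps.length : Int))
  if lo < (ps.length : Int) then
    let v := PySem.List.pyGetD ps lo 0
    if v < st.2 + window then (st.1 ++ [(i, v)], v + 1) else st
  else st

def lcs_anchors_windowed_py_alt (src : List String) (tgt : List String) (window : Int) : List (Int × Int) :=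
  let occ := pvOccDict tgt
  ((PySem.List.pyRange 0 (src.length : Int) 1).foldl (pvStepB src occ window) (([] : List (Int × Int)), (0 : Int))).1

-- ===== PRECONDITION & SPEC =====
def Spec_lcs_anchors_windowed_py (src : List String) (tgt : List String) (window : Int) (out : List (Int × Int)) : Prop := out = lcs_anchors_windowed_py_alt src tgt window
instance (src : List String) (tgt : List String) (window : Int) (out : List (Int × Int)) : Decidable (Spec_lcs_anchors_windowed_py src tgt window out) := by unfold Spec_lcs_anchors_windowed_py; infer_instance

-- ===== CLAIM (what is proved, stated in full; the proofs are below) =====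
def Claim_equal_lcs_anchors_windowed_py : Prop := ∀ (src : List String) (tgt : List String) (window : Int), Dom_lcs_anchors_windowed_py src tgt window → Spec_lcs_anchors_windowed_py src tgt window (lcs_anchors_windowed_py src tgt window)

-- ===== LEMMAS AND PROOFS =====

-- B's dict lookup is exactly the ascending list of positions of sw in tgt
theorem pvOcc_getD (tgt : List String) (sw : String) :
    (pvOccDict tgt).getD sw []
      = (PySem.List.pyRange 0 (tgt.length : Int) 1).filter (fun j => PySem.List.pyGetD tgt j "" == sw) := by
  unfold pvOccDict
  have h := (List.foldl_map (f := (Prod.swap : Int × String → String × Int))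
      (g := fun (d : PySem.Dict String (List Int)) p => d.modify p.1 [] (· ++ [p.2]))
      (l := PySem.List.enumerate tgt) (init := PySem.Dict.empty)).symm
  rw [show ((PySem.List.enumerate tgt).foldl (fun d p => d.modify p.2 [] (· ++ [p.1])) PySem.Dict.empty)
      = ((PySem.List.enumerate tgt).map Prod.swap).foldl (fun d p => d.modify p.1 [] (· ++ [p.2])) PySem.Dict.empty from h]
  rw [PySem.Dict.getD_foldl_modify_append]
  rw [show (PySem.List.enumerate tgt : List (Int × String)) = PySem.List.enumerate tgt 0 from rfl]
  rw [PySem.List.enumerate_eq_map_pyRange (d := "")]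
  simp [List.map_map, List.filter_map, Function.comp_def, PySem.Dict.getD_empty]

-- index monotonicity of B's occurrence lists
theorem pvOcc_mono (tgt : List String) (sw : String) :
    ∀ (a b : Nat), a < b → b < ((pvOccDict tgt).getD sw []).length →
      ((pvOccDict tgt).getD sw []).getD a 0 < ((pvOccDict tgt).getD sw []).getD b 0 := by
  intro a b hab hb
  have hp : ((pvOccDict tgt).getD sw []).Pairwise (· < ·) := by
    rw [pvOcc_getD]
    exact List.Pairwise.filter _ (PySem.List.pairwise_lt_pyRange_one 0 (tgt.length : Int))
  rw [List.getD_eq_getElem _ _ (by omega), List.getD_eq_getElem _ _ hb]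
  exact List.pairwise_iff_getElem.mp hp a b (by omega) hb hab

-- spec of the binary search: on an index-monotone list it brackets the first element ≥ x
theorem pvBisect_spec (ps : List Int) (x : Int)
    (hmono : ∀ (a b : Nat), a < b → b < ps.length → ps.getD a 0 < ps.getD b 0) :
    ∀ (lo hi : Int), 0 ≤ lo → lo ≤ hi → hi ≤ (ps.length : Int) →
      (∀ k : Nat, (k : Int) < lo → ps.getD k 0 < x) →
      (∀ k : Nat, hi ≤ (k : Int) → k < ps.length → x ≤ ps.getD k 0) →
      lo ≤ pvBisect ps x lo hi ∧ pvBisect ps x lo hi ≤ hi ∧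
      (∀ k : Nat, (k : Int) < pvBisect ps x lo hi → ps.getD k 0 < x) ∧
      (∀ k : Nat, pvBisect ps x lo hi ≤ (k : Int) → k < ps.length → x ≤ ps.getD k 0) := by
  have main : ∀ (n : Nat) (lo hi : Int), (hi - lo).toNat ≤ n → 0 ≤ lo → lo ≤ hi → hi ≤ (ps.length : Int) →
      (∀ k : Nat, (k : Int) < lo → ps.getD k 0 < x) →
      (∀ k : Nat, hi ≤ (k : Int) → k < ps.length → x ≤ ps.getD k 0) →
      lo ≤ pvBisect ps x lo hi ∧ pvBisect ps x lo hi ≤ hi ∧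
      (∀ k : Nat, (k : Int) < pvBisect ps x lo hi → ps.getD k 0 < x) ∧
      (∀ k : Nat, pvBisect ps x lo hi ≤ (k : Int) → k < ps.length → x ≤ ps.getD k 0) := by
    intro n
    induction n with
    | zero =>
      intro lo hi hn h0 hlh hhl Hlow Hhigh
      have heq : lo = hi := by omega
      rw [pvBisect, dif_neg (by omega : ¬ lo < hi)]
      exact ⟨le_refl lo, by omega, Hlow, fun k hk1 hk2 => Hhigh k (by omega) hk2⟩
    | succ n ih =>
      intro lo hi hn h0 hlh hhl Hlow Hhigh
      by_cases hlt : lo < hi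
      · have hm1 := (PySem.Int.floordiv_two_mid_bounds (le_of_lt hlt)).1
        have hm2 : PySem.Int.floordiv (lo + hi) 2 < hi :=
          (PySem.Int.floordiv_lt_iff_lt_mul (by omega)).mpr (by omega)
        set m : Int := PySem.Int.floordiv (lo + hi) 2 with hmdef
        have hun : pvBisect ps x lo hi =
            if PySem.List.pyGetD ps m 0 < x then pvBisect ps x (m + 1) hi else pvBisect ps x lo m := by
          rw [pvBisect, dif_pos hlt]
        have hmnat : m = ((m.toNat : Nat) : Int) := by omega
        have hmlen : m.toNat < ps.length := by omega
        have hget : PySem.List.pyGetD ps m 0 = ps.getD m.toNat 0 := by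
          rw [hmnat, PySem.List.pyGetD_natCast]
          simp
          congr 2
          omega
        rw [hun, hget]
        by_cases hc : ps.getD m.toNat 0 < x
        · rw [if_pos hc]
          have h' := ih (m + 1) hi (by omega) (by omega) (by omega) hhl
            (fun k hk => by
              rcases lt_trichotomy (k : Int) m with h | h | h
              · exact lt_trans (hmono k m.toNat (by omega) hmlen) hc
              · have : k = m.toNat := by omega
                rw [this]; exact hc
              · omega)
            Hhigh
          exact ⟨by omega, by omega, h'.2.2.1, h'.2.2.2⟩
        · rw [if_neg hc]
          have h' := ih lo m (by omega) h0 (by omega) (by omega) Hlow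
            (fun k hk1 hk2 => by
              rcases lt_trichotomy (k : Int) m with h | h | h
              · omega
              · have : k = m.toNat := by omega
                rw [this]; omega
              · exact le_trans (by omega) (le_of_lt (hmono m.toNat k (by omega) hk2)))
          exact ⟨h'.1, by omega, h'.2.2.1, h'.2.2.2⟩
      · rw [pvBisect, dif_neg hlt]
        exact ⟨le_refl lo, hlh, Hlow, fun k hk1 hk2 => Hhigh k (by omega) hk2⟩
  intro lo hi h0 hlh hhl Hlow Hhigh
  exact main (hi - lo).toNat lo hi le_rfl h0 hlh hhl Hlow Hhigh

-- first element ≥ x of a list, located by its index bracket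
theorem pvFind?_of_bracket (x : Int) :
    ∀ (ps : List Int) (r : Nat), r ≤ ps.length →
      (∀ k : Nat, k < r → ps.getD k 0 < x) →
      (r < ps.length → x ≤ ps.getD r 0) →
      ps.find? (fun j => decide (x ≤ j)) = if h : r < ps.length then some (ps.getD r 0) else none := by
  intro ps
  induction ps with
  | nil =>
    intro r hr _ _
    simp
  | cons p t ih =>
    intro r hr hlow hhi
    by_cases hx : x ≤ p
    · have hr0 : r = 0 := by
        by_contra hne
        have := hlow 0 (by omega)
        simp only [List.getD_cons_zero] at this
        omega
      subst hr0
      simp [List.find?, hx]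
    · have hr1 : 1 ≤ r := by
        by_contra hne
        have h0 : r = 0 := by omega
        have := hhi (by rw [h0]; simp)
        rw [h0] at this
        simp only [List.getD_cons_zero] at this
        omega
      obtain ⟨r', rfl⟩ : ∃ r', r = r' + 1 := ⟨r - 1, by omega⟩
      have htl := ih r' (by simpa using hr)
        (fun k hk => by simpa using hlow (k + 1) (by omega))
        (fun hlt => by simpa using hhi (by simpa using hlt))
      have hfp : (fun j => decide (x ≤ j)) p = false := by simp [hx]
      simp only [List.find?_cons, hfp, htl]
      by_cases hlen : r' < t.length
      · rw [dif_pos hlen, dif_pos (by simpa using hlen)]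
        simp
      · rw [dif_neg hlen, dif_neg (by simpa using hlen)]

theorem pvFind?_filter {α : Type} (l : List α) (p q : α → Bool) :
    (l.filter p).find? q = l.find? (fun a => p a && q a) := by
  induction l with
  | nil => rfl
  | cons x t ih =>
    by_cases hp : p x = true
    · by_cases hq : q x = true
      · simp [hp, hq]
      · simp [hp, hq, ih]
    · simp [Bool.eq_false_iff.mpr hp, ih]

theorem pvFind?_congr {α : Type} (l : List α) (p q : α → Bool)
    (h : ∀ x ∈ l, p x = q x) : l.find? p = l.find? q := by
  induction l with
  | nil => rfl
  | cons x t ih =>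
    have hx := h x (by simp)
    by_cases hq : q x = true
    · simp [hx ▸ hq, hq]
    · have : q x = false := Bool.eq_false_iff.mpr hq
      simp [hx, this, ih (fun y hy => h y (by simp [hy]))]

-- a range's find? = some j means every earlier range element fails the test
theorem pvFirst_fail (a b j : Int) (P : Int → Bool)
    (hf : (PySem.List.pyRange a b 1).find? P = some j) :
    ∀ x, a ≤ x → x < j → P x = false := by
  intro x hx hxj
  have hjmem := PySem.List.mem_pyRange_one.mp (List.mem_of_find?_eq_some hf)
  have hsplit : PySem.List.pyRange a b 1 = PySem.List.pyRange a (x+1) 1 ++ PySem.List.pyRange (x+1) b 1 :=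
    PySem.List.pyRange_one_append a (x+1) b (by omega) (by omega)
  rw [hsplit, List.find?_append] at hf
  cases hA : (PySem.List.pyRange a (x+1) 1).find? P with
  | none =>
    have := List.find?_eq_none.mp hA x (PySem.List.mem_pyRange_one.mpr ⟨hx, by omega⟩)
    simpa using this
  | some y =>
    rw [hA] at hf
    simp only [Option.some_or, Option.some.injEq] at hf
    have := (PySem.List.mem_pyRange_one.mp (List.mem_of_find?_eq_some hA)).2
    exfalso; omega

-- conversely, the first matching range element is the find? result
theorem pvFind?_pyRange_eq_some (a b j : Int) (P : Int → Bool)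
    (h1 : a ≤ j) (h2 : j < b) (hPj : P j = true)
    (hfail : ∀ x, a ≤ x → x < j → P x = false) :
    (PySem.List.pyRange a b 1).find? P = some j := by
  have hsplit : PySem.List.pyRange a b 1 = PySem.List.pyRange a j 1 ++ PySem.List.pyRange j b 1 :=
    PySem.List.pyRange_one_append a j b h1 (by omega)
  have hA : (PySem.List.pyRange a j 1).find? P = none := by
    rw [List.find?_eq_none]
    intro x hxmem
    have hm := PySem.List.mem_pyRange_one.mp hxmem
    simp [hfail x hm.1 hm.2]
  rw [hsplit, List.find?_append, hA, Option.none_or,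
    PySem.List.pyRange_one_cons (by omega : j < b)]
  simp [hPj]

-- B's occurrence-list search equals A's windowed range search, pointwise, under 0 ≤ j_start ≤ len(tgt)
theorem pvStep_eq (src tgt : List String) (window : Int) (acc : List (Int × Int)) (js : Int)
    (h0 : 0 ≤ js) (h1 : js ≤ (tgt.length : Int)) (j : Int) :
    pvStepB src (pvOccDict tgt) window (acc, js) j
      = pvStepA tgt window (acc, js) (j, PySem.List.pyGetD src j "") := by
  unfold pvStepA pvStepB
  dsimp only
  set sw : String := PySem.List.pyGetD src j "" with hsw
  set ps : List Int := (pvOccDict tgt).getD sw [] with hpsdef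
  set n : Int := (tgt.length : Int) with hn
  set P : Int → Bool := fun v => PySem.List.pyGetD tgt v "" == sw with hP
  -- bracket the binary-search result
  set r : Int := pvBisect ps js 0 ((ps.length : Int)) with hrdef
  obtain ⟨hr0, hr1, hlow, hhigh⟩ := pvBisect_spec ps js (pvOcc_mono tgt sw) 0 ((ps.length : Int))
    le_rfl (by positivity) le_rfl (fun k hk => absurd hk (by omega)) (fun k hk1 hk2 => absurd hk1 (by omega))
  have hfind : ps.find? (fun v => decide (js ≤ v)) =
      if h : r.toNat < ps.length then some (ps.getD r.toNat 0) else none :=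
    pvFind?_of_bracket js ps r.toNat (by omega) (fun k hk => hlow k (by omega))
      (fun h => hhigh r.toNat (by omega) h)
  -- B's occurrence list is the filtered index range, so its first element ≥ js is A's unwindowed search
  have hB : ps.find? (fun v => decide (js ≤ v)) = (PySem.List.pyRange js n 1).find? P := by
    rw [hpsdef, pvOcc_getD, pvFind?_filter,
      PySem.List.pyRange_one_append 0 js n h0 h1, List.find?_append]
    have hfirst : (PySem.List.pyRange 0 js 1).find? (fun a => P a && decide (js ≤ a)) = none := by
      rw [List.find?_eq_none]
      intro v hv
      have := (PySem.List.mem_pyRange_one.mp hv).2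
      simp
      omega
    rw [hfirst, Option.none_or]
    exact pvFind?_congr _ _ _ (fun v hv => by
      have := (PySem.List.mem_pyRange_one.mp hv).1
      simp [this, hP])
  by_cases hrl : r.toNat < ps.length
  · -- the search landed on an occurrence v = ps[r]
    rw [dif_pos hrl] at hfind
    set v : Int := ps.getD r.toNat 0 with hvdef
    have hfindR : (PySem.List.pyRange js n 1).find? P = some v := by rw [← hB, hfind]
    have hjmem := PySem.List.mem_pyRange_one.mp (List.mem_of_find?_eq_some hfindR)
    have hPv : P v = true := List.find?_some hfindR
    have hfail := pvFirst_fail js n v P hfindR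
    have hrcast : r = ((r.toNat : Nat) : Int) := by omega
    have hgetr : PySem.List.pyGetD ps r 0 = v := by rw [hrcast, PySem.List.pyGetD_natCast]
    rw [if_pos (by omega : r < (ps.length : Int)), hgetr]
    by_cases hwin : v < js + window
    · rw [pvFind?_pyRange_eq_some js (min (js + window) n) v P hjmem.1 (by omega) hPv
        (fun y hy hyv => hfail y hy hyv)]
      simp [hwin]
    · have hnone : (PySem.List.pyRange js (min (js + window) n) 1).find? P = none := by
        rw [List.find?_eq_none]
        intro y hy
        have hm := PySem.List.mem_pyRange_one.mp hy
        simp [hfail y hm.1 (by omega)]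
      rw [hnone, if_neg hwin]
  · -- no occurrence ≥ js at all
    rw [dif_neg hrl] at hfind
    have hfindR : (PySem.List.pyRange js n 1).find? P = none := by rw [← hB, hfind]
    have hnone : (PySem.List.pyRange js (min (js + window) n) 1).find? P = none := by
      rw [List.find?_eq_none]
      intro y hy
      have hm := PySem.List.mem_pyRange_one.mp hy
      exact List.find?_eq_none.mp hfindR y (PySem.List.mem_pyRange_one.mpr ⟨hm.1, by omega⟩)
    rw [hnone, if_neg (by omega : ¬ r < (ps.length : Int))]

-- A's next j_start stays within bounds
theorem pvStepA_bounds (tgt : List String) (window : Int) (acc : List (Int × Int)) (js : Int)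
    (h0 : 0 ≤ js) (h1 : js ≤ (tgt.length : Int)) (p : Int × String) :
    0 ≤ (pvStepA tgt window (acc, js) p).2 ∧ (pvStepA tgt window (acc, js) p).2 ≤ (tgt.length : Int) := by
  unfold pvStepA
  cases hf : (PySem.List.pyRange js (min (js + window) ((tgt.length : Int))) 1).find?
      (fun j => PySem.List.pyGetD tgt j "" == p.2) with
  | none => simpa [hf] using ⟨h0, h1⟩
  | some j =>
    have hm := PySem.List.mem_pyRange_one.mp (List.mem_of_find?_eq_some hf)
    simp only [hf]
    refine ⟨by omega, ?_⟩
    simp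
    omega

theorem pvFold_eq (src tgt : List String) (window : Int) :
    ∀ (l : List Int) (acc : List (Int × Int)) (js : Int),
      0 ≤ js → js ≤ (tgt.length : Int) →
      l.foldl (pvStepB src (pvOccDict tgt) window) (acc, js)
        = l.foldl (fun st j => pvStepA tgt window st (j, PySem.List.pyGetD src j "")) (acc, js) := by
  intro l
  induction l with
  | nil => intro acc js _ _; rfl
  | cons j t ih =>
    intro acc js h0 h1
    rw [List.foldl_cons, List.foldl_cons, pvStep_eq src tgt window acc js h0 h1 j]
    obtain ⟨hb0, hb1⟩ := pvStepA_bounds tgt window acc js h0 h1 (j, PySem.List.pyGetD src j "")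
    calc t.foldl (pvStepB src (pvOccDict tgt) window) (pvStepA tgt window (acc, js) (j, PySem.List.pyGetD src j ""))
        = t.foldl (pvStepB src (pvOccDict tgt) window)
            ((pvStepA tgt window (acc, js) (j, PySem.List.pyGetD src j "")).1,
             (pvStepA tgt window (acc, js) (j, PySem.List.pyGetD src j "")).2) := by rw [Prod.mk.eta]
      _ = t.foldl (fun st j => pvStepA tgt window st (j, PySem.List.pyGetD src j ""))
            ((pvStepA tgt window (acc, js) (j, PySem.List.pyGetD src j "")).1,
             (pvStepA tgt window (acc, js) (j, PySem.List.pyGetD src j "")).2) := ih _ _ hb0 hb1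
      _ = t.foldl (fun st j => pvStepA tgt window st (j, PySem.List.pyGetD src j ""))
            (pvStepA tgt window (acc, js) (j, PySem.List.pyGetD src j "")) := by rw [Prod.mk.eta]

-- ===== VERDICT (by name: the statement is the Claim_ definition above) =====
theorem lcs_anchors_windowed_py_spec : Claim_equal_lcs_anchors_windowed_py := by
  intro src tgt window _
  unfold Spec_lcs_anchors_windowed_py lcs_anchors_windowed_py lcs_anchors_windowed_py_alt
  show (List.foldl (pvStepA tgt window) ([], 0) (PySem.List.enumerate src)).1
      = (List.foldl (pvStepB src (pvOccDict tgt) window) ([], 0) (PySem.List.pyRange 0 (src.length : Int) 1)).1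
  rw [show (PySem.List.enumerate src : List (Int × String)) = PySem.List.enumerate src 0 from rfl,
    PySem.List.enumerate_eq_map_pyRange (d := ""), List.foldl_map,
    pvFold_eq src tgt window (PySem.List.pyRange 0 (src.length : Int) 1) [] 0 le_rfl (by positivity)]
  rfl
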